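-- pv_equiv track=rewrite | github.com/ignaciodefelippe/Python-Minesweeper | buscaminas/buscaminas.py | agregar_comas
-- ===== SOURCE A (Python) =====
-- def agregar_comas(linea: str) -> str:
--     """
--     Agrega comas entre cada caracter de una linea de texto sin contar los '-' para poder poner los -1 en las lineas.
--
--     Args:
--         linea (str): Linea de texto pasada por parametro a la cual se le van a agregar las comas.
--
--     Returns:
--         str:
--             linea_comas: Linea de texto con las comas agregadas.
--     """
--     linea_comas : str = ""
--     linea_sin_espacios : str = sin_espacios_y_saltos(linea)
--
--     for i in range (len(linea_sin_espacios)):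
--         linea_comas += linea_sin_espacios[i]
--         if linea_sin_espacios[i] != '-':
--             if i < len(linea_sin_espacios) - 1:
--                 linea_comas += ','
--
--     return linea_comas
--
-- def sin_espacios_y_saltos(linea : str) -> str:
--     """
--     Saca los espacios y saltos de linea de una linea de texto.
--
--     Args:
--         linea (str): Linea de texto pasada por parametro a la cual se le van a sacar los espacios y los saltos de linea.
--
--     Returns:
--         str:
--             linea_nueva: Linea de texto sin espacios ni saltos de linea.
--     """
--     linea_nueva : str = ""
--
--     for i in range (len(linea)):
--         if linea[i] != " " and linea[i] != "\n":
--             linea_nueva += str(linea[i])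
--
--     return linea_nueva
-- ===== SOURCE B (Python) =====
-- def agregar_comas(linea: str) -> str:
--     """Tokenize-then-join: each token is a run of '-' plus the following
--     non-dash char (trailing dashes form a final token); joining tokens
--     with ',' puts a comma after every non-dash char except the last."""
--     cleaned = [c for c in linea if c != ' ' and c != '\n']
--     tokens = []
--     cur = []
--     for c in cleaned:
--         cur.append(c)
--         if c != '-':
--             tokens.append(''.join(cur))
--             cur = []
--     if cur:
--         tokens.append(''.join(cur))
--     return ','.join(tokens)
-- ===== Notes on version B (the rewrite author's own statement) =====
-- stated objective: alternative
-- what changed: A walks the cleaned string by index, appending a comma after each non-dash char unless it is at the last index; B filters the string once, groups it into tokens (a run of dashes plus the following non-dash char) and joins the tokens with commas.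
import Mathlib
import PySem

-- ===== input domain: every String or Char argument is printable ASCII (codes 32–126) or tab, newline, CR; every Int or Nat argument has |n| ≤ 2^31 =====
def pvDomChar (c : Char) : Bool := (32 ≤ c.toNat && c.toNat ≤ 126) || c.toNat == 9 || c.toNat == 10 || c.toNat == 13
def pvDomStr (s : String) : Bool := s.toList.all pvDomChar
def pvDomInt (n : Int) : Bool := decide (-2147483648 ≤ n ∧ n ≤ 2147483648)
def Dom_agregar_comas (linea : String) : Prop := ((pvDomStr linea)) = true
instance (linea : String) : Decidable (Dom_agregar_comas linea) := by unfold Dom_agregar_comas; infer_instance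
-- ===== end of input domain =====

-- B replaces A's index-walk (comma after each non-dash char except at the last index)
-- by a tokenize-then-join pass: tokens are runs of '-' plus the following non-dash char.


-- ===== PORT A =====
-- helper sin_espacios_y_saltos: the index i is used only as linea[i], so the
-- loop is the structural fold over the characters in order
def sin_espacios_y_saltos (linea : String) : List Char :=
  linea.toList.foldl
    (fun acc c => if c != ' ' && c != '\n' then acc ++ [c] else acc) []

def agregar_comas (linea : String) : String :=
  let s : List Char := sin_espacios_y_saltos linea
  let n : Nat := s.length
  let out : List Char := (List.range n).foldl
    (fun acc i =>
      let acc := acc ++ [s.getD i ' ']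
      if s.getD i ' ' != '-' then
        (if (i : Int) < (n : Int) - 1 then acc ++ [','] else acc)
      else acc) []
  String.ofList out

-- ===== PORT B =====
-- the loop body of B, named so the invariant lemma can speak about it
def pvStepB (st : List (List Char) × List Char) (c : Char) : List (List Char) × List Char :=
  let cur := st.2 ++ [c]
  if c != '-' then (st.1 ++ [cur], []) else (st.1, cur)

def agregar_comas_alt (linea : String) : String :=
  let cleaned : List Char := linea.toList.filter (fun c => c != ' ' && c != '\n')
  let st := cleaned.foldl pvStepB ([], [])
  let tokens := if st.2.isEmpty then st.1 else st.1 ++ [st.2]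
  String.ofList (PySem.Chars.join [','] tokens)

-- ===== PRECONDITION & SPEC =====
def Spec_agregar_comas (linea : String) (out : String) : Prop := out = agregar_comas_alt linea
instance (linea : String) (out : String) : Decidable (Spec_agregar_comas linea out) := by unfold Spec_agregar_comas; infer_instance

-- ===== CLAIM (what is proved, stated in full; the proofs are below) =====
def Claim_equal_agregar_comas : Prop := ∀ (linea : String), Dom_agregar_comas linea → Spec_agregar_comas linea (agregar_comas linea)

-- ===== LEMMAS AND PROOFS =====

-- the common value: comma after each non-dash char that is not last
def pvCommas : List Char → List Char
  | [] => []
  | c :: t => c :: (if c != '-' && !t.isEmpty then [','] else []) ++ pvCommas t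

theorem pvA_loop (s : List Char) : ∀ acc : List Char,
    (List.range s.length).foldl
      (fun acc i =>
        let acc := acc ++ [s.getD i ' ']
        if s.getD i ' ' != '-' then
          (if (i : Int) < (s.length : Int) - 1 then acc ++ [','] else acc)
        else acc) acc = acc ++ pvCommas s := by
  induction s with
  | nil => intro acc; simp [pvCommas]
  | cons c t ih =>
    intro acc
    rw [show (c :: t).length = t.length + 1 from rfl, List.range_succ_eq_map,
        List.foldl_cons, List.foldl_map]
    rw [PySem.List.foldl_congr_mem _ _
      (fun acc i =>
        let acc := acc ++ [t.getD i ' ']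
        if t.getD i ' ' != '-' then
          (if (i : Int) < (t.length : Int) - 1 then acc ++ [','] else acc)
        else acc) _ ?_]
    · rw [ih]
      cases t with
      | nil => simp [pvCommas]
      | cons d u =>
        by_cases hc : c = '-' <;>
          simp [pvCommas, hc, List.append_assoc]
    · intro acc i hi
      dsimp only
      simp only [Nat.succ_eq_add_one, List.getD_cons_succ]
      have h2 : ((i + 1 : Nat) : Int) < ((t.length + 1 : Nat) : Int) - 1 ↔
          ((i : Nat) : Int) < ((t.length : Nat) : Int) - 1 := by push_cast; omega
      by_cases hd : (t.getD i ' ' != '-') = true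
      · rw [if_pos hd, if_pos hd, if_congr h2 rfl rfl]
      · rw [if_neg hd, if_neg hd]

-- B's loop characterised: tokens collected so far, and the pending run
def pvToks (cur : List Char) : List Char → List (List Char)
  | [] => []
  | c :: t => if c != '-' then (cur ++ [c]) :: pvToks [] t else pvToks (cur ++ [c]) t

def pvLast (cur : List Char) : List Char → List Char
  | [] => cur
  | c :: t => if c != '-' then pvLast [] t else pvLast (cur ++ [c]) t

theorem pvB_loop (s : List Char) : ∀ (tokens : List (List Char)) (cur : List Char),
    s.foldl pvStepB (tokens, cur) = (tokens ++ pvToks cur s, pvLast cur s) := by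
  induction s with
  | nil => intro tokens cur; simp [pvToks, pvLast]
  | cons c t ih =>
    intro tokens cur
    rw [List.foldl_cons]
    by_cases hc : c = '-'
    · rw [show pvStepB (tokens, cur) c = (tokens, cur ++ [c]) by simp [pvStepB, hc], ih]
      simp [pvToks, pvLast, hc]
    · rw [show pvStepB (tokens, cur) c = (tokens ++ [cur ++ [c]], []) by simp [pvStepB, hc], ih]
      simp [pvToks, pvLast, hc, List.append_assoc]

def pvRender (tokens : List (List Char)) (last : List Char) : List Char :=
  PySem.Chars.join [','] (if last.isEmpty then tokens else tokens ++ [last])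

theorem pvRender_eq (s : List Char) : ∀ cur : List Char,
    pvRender (pvToks cur s) (pvLast cur s) = cur ++ pvCommas s ∧
    (pvToks cur s = [] ∧ (pvLast cur s).isEmpty → cur = [] ∧ s = []) := by
  induction s with
  | nil =>
    intro cur
    cases cur <;> simp [pvToks, pvLast, pvRender, pvCommas,
      PySem.Chars.join_nil, PySem.Chars.join_singleton]
  | cons c t ih =>
    intro cur
    by_cases hc : c = '-'
    · have h := ih (cur ++ [c])
      constructor
      · rw [show pvToks cur (c :: t) = pvToks (cur ++ [c]) t by simp [pvToks, hc],
            show pvLast cur (c :: t) = pvLast (cur ++ [c]) t by simp [pvLast, hc],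
            h.1]
        simp [pvCommas, hc, List.append_assoc]
      · intro hh
        rw [show pvToks cur (c :: t) = pvToks (cur ++ [c]) t by simp [pvToks, hc],
            show pvLast cur (c :: t) = pvLast (cur ++ [c]) t by simp [pvLast, hc]] at hh
        have := h.2 hh
        simp at this
    · have h := ih ([] : List Char)
      constructor
      · rw [show pvToks cur (c :: t) = (cur ++ [c]) :: pvToks [] t by simp [pvToks, hc],
            show pvLast cur (c :: t) = pvLast [] t by simp [pvLast, hc]]
        cases t with
        | nil =>
          simp [pvToks, pvLast, pvRender, pvCommas,
            PySem.Chars.join_singleton]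
        | cons d u =>
          have hne : ¬ (pvToks [] (d :: u) = [] ∧ (pvLast [] (d :: u)).isEmpty = true) :=
            fun hh => by simpa using (h.2 hh).2
          have h1 := h.1
          unfold pvRender at h1 ⊢
          have hcomm : pvCommas (c :: d :: u) = c :: ',' :: pvCommas (d :: u) := by
            simp [pvCommas, hc]
          rcases Decidable.em ((pvLast [] (d :: u)).isEmpty = true) with hl | hl
          · rcases hx : pvToks [] (d :: u) with _ | ⟨p, ps⟩
            · exact absurd ⟨hx, hl⟩ hne
            · rw [if_pos hl] at h1 ⊢
              rw [hx] at h1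
              rw [PySem.Chars.join_cons_cons, h1, hcomm]
              simp [List.append_assoc]
          · rw [if_neg hl] at h1 ⊢
            rw [show ((cur ++ [c]) :: pvToks [] (d :: u)) ++ [pvLast [] (d :: u)]
                  = (cur ++ [c]) :: (pvToks [] (d :: u) ++ [pvLast [] (d :: u)]) from rfl]
            rcases hx : pvToks [] (d :: u) ++ [pvLast [] (d :: u)] with _ | ⟨p, ps⟩
            · simp at hx
            · rw [hx] at h1
              rw [PySem.Chars.join_cons_cons, h1, hcomm]
              simp [List.append_assoc]
      · intro hh
        rw [show pvToks cur (c :: t) = (cur ++ [c]) :: pvToks [] t by simp [pvToks, hc]] at hh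
        simp at hh

-- ===== VERDICT (by name: the statement is the Claim_ definition above) =====
theorem agregar_comas_spec : Claim_equal_agregar_comas := by
  intro linea _
  unfold Spec_agregar_comas agregar_comas agregar_comas_alt sin_espacios_y_saltos
  have hfilter :
      linea.toList.foldl
        (fun acc c => if (c != ' ' && c != '\n') = true then acc ++ [c] else acc) [] =
      linea.toList.filter (fun c => c != ' ' && c != '\n') := by
    simpa using PySem.List.foldl_append_if (fun c => c != ' ' && c != '\n') id linea.toList []
  dsimp only
  rw [hfilter, pvA_loop, pvB_loop]
  have h := (pvRender_eq (linea.toList.filter (fun c => c != ' ' && c != '\n')) []).1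
  unfold pvRender at h
  simp only [List.nil_append] at h ⊢
  rw [h]
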